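-- pv_equiv track=rewrite | github.com/lnixffm/aoc2020 | day_15.py | find_n
-- ===== SOURCE A (Python) =====
-- def find_n(game_list):
--     sn = game_list[-1]
--     f = 0
--     c = 1
--     for n in game_list[::-1]:
--         if n == sn:
--             f += 1
--         if f == 2:
--             a = len(game_list) - c + 1
--             return a
--         c += 1
-- ===== SOURCE B (Python) =====
-- def find_n(game_list):
--     sn = game_list[-1]
--     positions = [i for i, n in enumerate(game_list) if n == sn]
--     if len(positions) >= 2:
--         return positions[-2] + 1
-- ===== Notes on version B (the rewrite author's own statement) =====
-- stated objective: simpler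
-- what changed: Replaces A's reverse scan with two running counters and an early return by building the index table of occurrences of the last element once and directly returning the penultimate index plus one.
import Mathlib
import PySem

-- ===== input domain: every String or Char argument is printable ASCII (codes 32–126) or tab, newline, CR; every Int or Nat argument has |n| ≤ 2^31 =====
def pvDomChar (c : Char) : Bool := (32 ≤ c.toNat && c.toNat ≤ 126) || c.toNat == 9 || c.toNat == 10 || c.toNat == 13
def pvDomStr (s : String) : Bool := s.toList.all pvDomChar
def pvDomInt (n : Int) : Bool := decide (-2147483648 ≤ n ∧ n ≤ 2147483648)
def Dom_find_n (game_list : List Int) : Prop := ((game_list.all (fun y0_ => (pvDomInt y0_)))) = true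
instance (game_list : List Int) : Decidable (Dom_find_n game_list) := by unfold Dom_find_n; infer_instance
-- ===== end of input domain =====

-- B replaces A's reverse scan with counters and early return by an index table of
-- occurrences of the last element plus a direct penultimate lookup (objective: simpler).

-- ===== PORT A =====
-- the for-loop over game_list[::-1] with state (f, c) and the early 'return a'
def findALoop (len sn : Int) : List Int → Int → Int → Option Int
  | [], _, _ => none
  | n :: rest, f, c =>
    let f' := if n == sn then f + 1 else f
    if f' == 2 then some (len - c + 1) else findALoop len sn rest f' (c + 1)

def find_n (game_list : List Int) : Option Int :=
  match PySem.List.pyGet? game_list (-1) with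
  | none => none       -- indexing the last element raises IndexError on the empty list: excluded by Pre_
  | some sn =>
    match PySem.List.slice? game_list none none (-1) with
    | none => none     -- unreachable: step = -1 ≠ 0
    | some rev => findALoop (game_list.length : Int) sn rev 0 1

-- ===== PORT B =====
def find_n_alt (game_list : List Int) : Option Int :=
  match PySem.List.pyGet? game_list (-1) with
  | none => none       -- indexing the last element raises IndexError on the empty list: excluded by Pre_
  | some sn =>
    let positions := ((PySem.List.enumerate game_list 0).filter (fun p => p.2 == sn)).map (·.1)
    if positions.length ≥ 2 then some (PySem.List.pyGetD positions (-2) 0 + 1)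
    else none

-- ===== PRECONDITION & SPEC =====
-- Pre_ excludes only the empty list, on which A (and B) raise IndexError when taking the last element.
def Pre_find_n (game_list : List Int) : Prop := game_list ≠ []
instance (game_list : List Int) : Decidable (Pre_find_n game_list) := by unfold Pre_find_n; infer_instance
def pvWitness_find_n : List Int := [1, 1]

def Spec_find_n (game_list : List Int) (out : Option Int) : Prop := out = find_n_alt game_list
instance (game_list : List Int) (out : Option Int) : Decidable (Spec_find_n game_list out) := by unfold Spec_find_n; infer_instance

-- ===== CLAIM (what is proved, stated in full; the proofs are below) =====
def Claim_equal_find_n : Prop := ∀ (game_list : List Int), Dom_find_n game_list → Pre_find_n game_list → Spec_find_n game_list (find_n game_list)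

-- ===== LEMMAS AND PROOFS =====

-- A's loop with f = 1 is a first-match search over the remaining reversed list
theorem findALoop_one (len sn : Int) (xs : List Int) : ∀ c : Int,
    findALoop len sn xs 1 c
      = (xs.findIdx? (· == sn)).map (fun j => len - (c + (j : Int)) + 1) := by
  induction xs with
  | nil => intro c; simp [findALoop]
  | cons x xs ih =>
    intro c
    by_cases hx : x == sn
    · simp [findALoop, hx, List.findIdx?_cons]
    · rw [show findALoop len sn (x :: xs) 1 c = findALoop len sn xs 1 (c + 1) by
        simp [findALoop, hx]]
      rw [ih]
      cases h : List.findIdx? (· == sn) xs with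
      | none => simp [List.findIdx?_cons, hx, h]
      | some j =>
        simp [List.findIdx?_cons, hx, h]
        push_cast
        ring

theorem enumerate_append (xs ys : List Int) : ∀ s : Int,
    PySem.List.enumerate (xs ++ ys) s
      = PySem.List.enumerate xs s ++ PySem.List.enumerate ys (s + xs.length) := by
  induction xs with
  | nil => intro s; simp [PySem.List.enumerate_nil]
  | cons x xs ih =>
    intro s
    simp only [List.cons_append, PySem.List.enumerate_cons, ih, List.length_cons]
    congr 2
    push_cast
    ring

-- the bridge: last recorded position of sn vs first index of sn in the reverse
theorem bridge (sn : Int) (ys : List Int) : ∀ s : Int,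
    (((PySem.List.enumerate ys s).filter (fun p => p.2 == sn)).map (·.1)).getLast?
      = (ys.reverse.findIdx? (· == sn)).map
          (fun j => s + (ys.length : Int) - 1 - (j : Int)) := by
  induction ys using List.reverseRecOn with
  | nil => intro s; simp [PySem.List.enumerate_nil]
  | append_singleton zs a ih =>
    intro s
    rw [enumerate_append]
    by_cases ha : a == sn
    · simp [PySem.List.enumerate_cons, PySem.List.enumerate_nil, ha, List.findIdx?_cons,
        List.getLast?_append]
      omega
    · simp only [List.reverse_append, List.reverse_singleton, List.singleton_append,
        List.findIdx?_cons, ha, Bool.false_eq_true, if_false,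
        PySem.List.enumerate_cons, PySem.List.enumerate_nil, List.filter_append,
        List.filter_cons, List.filter_nil, List.append_nil, List.map_append,
        List.map_nil, List.length_append, List.length_cons, List.length_nil]
      rw [ih]
      cases h : List.findIdx? (· == sn) zs.reverse with
      | none => simp [h]
      | some j =>
        simp [h]
        push_cast
        ring

theorem find_n_spec_aux (game_list : List Int) (h : game_list ≠ []) :
    find_n game_list = find_n_alt game_list := by
  obtain ⟨ys, x, rfl⟩ : ∃ ys x, game_list = ys ++ [x] := by
    rcases List.eq_nil_or_concat game_list with h' | ⟨ys, x, h'⟩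
    · exact absurd h' h
    · exact ⟨ys, x, by simp [h', List.concat_eq_append]⟩
  unfold find_n find_n_alt
  rw [PySem.List.pyGet?_neg_one_append_singleton, PySem.List.slice?_none_none_neg_one]
  simp only [List.reverse_append, List.reverse_singleton, List.singleton_append]
  -- A: first step consumes x = sn, f becomes 1
  rw [show findALoop ((ys ++ [x]).length : Int) x (x :: ys.reverse) 0 1
        = findALoop ((ys ++ [x]).length : Int) x ys.reverse 1 2 by
      simp [findALoop]]
  rw [findALoop_one]
  -- B: positions = P ++ [ys.length]
  rw [enumerate_append]
  simp only [PySem.List.enumerate_cons, PySem.List.enumerate_nil, List.filter_append,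
    List.filter_cons, List.filter_nil, beq_self_eq_true, if_true, List.append_nil,
    List.map_append, List.map_cons, List.map_nil]
  set P : List Int := ((PySem.List.enumerate ys 0).filter (fun p => p.2 == x)).map (·.1) with hP
  have hb : P.getLast? = (ys.reverse.findIdx? (· == x)).map
      (fun j => 0 + (ys.length : Int) - 1 - (j : Int)) := bridge x ys 0
  cases h : List.findIdx? (· == x) ys.reverse with
  | none =>
    rw [h] at hb
    have hb' : P = [] := List.getLast?_eq_none_iff.mp hb
    simp [hb']
  | some j =>
    rw [h] at hb
    have hb' : P.getLast? = some (0 + (ys.length : Int) - 1 - (j : Int)) := hb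
    have hne : P ≠ [] := by
      intro e
      rw [e] at hb'
      simp at hb'
    have hlenP : 1 ≤ P.length := List.length_pos_of_ne_nil hne
    have hlen2 : 2 ≤ (P ++ [0 + (ys.length : Int)]).length := by
      simp only [List.length_append, List.length_cons, List.length_nil]
      omega
    have hmap : (Option.map (fun j => (↑(ys ++ [x]).length : Int) - (2 + j) + 1)
        (do let a ← some j; pure ((a : Int))))
          = some ((↑(ys ++ [x]).length : Int) - (2 + (j : Int)) + 1) := rfl
    rw [hmap, if_pos hlen2]
    have hgl : (P ++ [0 + (ys.length : Int)])[(P ++ [0 + (ys.length : Int)]).length - 2]?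
        = some (0 + (ys.length : Int) - 1 - (j : Int)) := by
      rw [List.getElem?_append_left (by
        simp only [List.length_append, List.length_cons, List.length_nil]; omega)]
      rw [show (P ++ [0 + (ys.length : Int)]).length - 2 = P.length - 1 by
        simp only [List.length_append, List.length_cons, List.length_nil]; omega]
      rw [← List.getLast?_eq_getElem?]
      exact hb'
    have hpg : PySem.List.pyGetD (P ++ [0 + (ys.length : Int)]) (-2) 0
        = 0 + (ys.length : Int) - 1 - (j : Int) := by
      rw [PySem.List.pyGetD_neg_ofNat _ 2 0 (by omega) hlen2]
      exact Option.some.inj ((List.getElem?_eq_getElem (by omega)).symm.trans hgl)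
    rw [hpg]
    congr 1
    simp only [List.length_append, List.length_cons, List.length_nil]
    push_cast
    ring

-- ===== VERDICT (by name: the statement is the Claim_ definition above) =====
theorem find_n_spec : Claim_equal_find_n := by
  intro game_list _ hpre
  exact find_n_spec_aux game_list hpre
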